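-- pv_equiv track=rewrite | github.com/cdamezcua/Petit-Robot | Ricochet_Robots_A01641742.py | comprueba_formato_de_solucion
-- ===== SOURCE A (Python) =====
-- def comprueba_formato_de_solucion(solucion):
--     """Función que retorna verdadero si la solucion que se le introduce cumple
--     con el formato establecido en las instrucciones y falso en caso
--     contrario."""
--     if len(solucion) == 0:
--         return True
--     for ch in solucion:
--         if ch not in "01234nseo":
--             return False
--     if solucion[0] not in "01234":
--         return False
--     if solucion[-1] not in "nseo":
--         return False
--     for i in range(len(solucion) - 1):
--         if solucion[i] in "01234" and solucion[i + 1] in "01234":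
--             return False
--     return True
-- ===== SOURCE B (Python) =====
-- def comprueba_formato_de_solucion(solucion):
--     # Single left-to-right pass with a 3-value state machine:
--     # state 0 = at start, 1 = just read a digit, 2 = just read a letter.
--     state = 0
--     for ch in solucion:
--         if state == 1:
--             if ch in "nseo":
--                 state = 2
--             else:
--                 return False
--         else:
--             if ch in "01234":
--                 state = 1
--             elif state == 2 and ch in "nseo":
--                 state = 2
--             else:
--                 return False
--     return state != 1
-- ===== Notes on version B (the rewrite author's own statement) =====
-- stated objective: idiomatic
-- what changed: A's four separate checks (membership scan, first char, last char, adjacent-pair scan over range) are replaced by a single left-to-right pass driven by a 3-state machine (start / just-read-digit / just-read-letter) that rejects on the first offending character.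
import Mathlib
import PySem

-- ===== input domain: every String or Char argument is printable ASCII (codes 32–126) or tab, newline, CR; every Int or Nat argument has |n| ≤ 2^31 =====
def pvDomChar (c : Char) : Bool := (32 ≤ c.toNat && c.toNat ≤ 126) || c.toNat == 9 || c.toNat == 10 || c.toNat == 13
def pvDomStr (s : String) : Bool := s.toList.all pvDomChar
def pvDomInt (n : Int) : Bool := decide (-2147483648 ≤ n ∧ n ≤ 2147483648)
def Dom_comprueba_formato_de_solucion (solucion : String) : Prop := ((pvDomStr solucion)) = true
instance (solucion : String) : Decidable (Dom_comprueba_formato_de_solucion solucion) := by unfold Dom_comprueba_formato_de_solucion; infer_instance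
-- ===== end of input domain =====

-- B replaces A's four separate passes (valid chars, first, last, adjacent pairs) by one
-- left-to-right pass with a 3-value state machine: idiomatic single scan, same O(n) cost.

-- ===== PORT A =====
-- ch in "01234" / "nseo" / "01234nseo"
def pvDig (c : Char) : Bool := ("01234".toList).contains c
def pvLet (c : Char) : Bool := ("nseo".toList).contains c
def pvValid (c : Char) : Bool := ("01234nseo".toList).contains c

def comprueba_formato_de_solucion (solucion : String) : Bool :=
  if solucion.toList.length = 0 then true
  else if ¬ (solucion.toList.all pvValid) then false                 -- first for-loop, early return
  else if ¬ pvDig (solucion.toList.headD ' ') then false             -- solucion[0], nonempty here: exact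
  else if ¬ pvLet (solucion.toList.getLastD ' ') then false          -- solucion[-1], nonempty here: exact
  else (List.range (solucion.toList.length - 1)).all (fun i =>
    ¬ (pvDig (solucion.toList.getD i ' ') ∧ pvDig (solucion.toList.getD (i+1) ' ')))  -- second for-loop

-- ===== PORT B =====
-- the state-machine loop of Source B: state 0 = start, 1 = just read digit, 2 = just read letter
def pvGoB : Nat → List Char → Bool
  | st, [] => st ≠ 1
  | 1, c :: rest => if pvLet c then pvGoB 2 rest else false
  | st, c :: rest =>
      if pvDig c then pvGoB 1 rest
      else if st = 2 ∧ pvLet c then pvGoB 2 rest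
      else false

def comprueba_formato_de_solucion_alt (solucion : String) : Bool :=
  pvGoB 0 solucion.toList

-- ===== PRECONDITION & SPEC =====
def Spec_comprueba_formato_de_solucion (solucion : String) (out : Bool) : Prop := out = comprueba_formato_de_solucion_alt solucion
instance (solucion : String) (out : Bool) : Decidable (Spec_comprueba_formato_de_solucion solucion out) := by unfold Spec_comprueba_formato_de_solucion; infer_instance

-- ===== CLAIM (what is proved, stated in full; the proofs are below) =====
def Claim_equal_comprueba_formato_de_solucion : Prop := ∀ (solucion : String), Dom_comprueba_formato_de_solucion solucion → Spec_comprueba_formato_de_solucion solucion (comprueba_formato_de_solucion solucion)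

-- ===== LEMMAS AND PROOFS =====

-- recursive adjacency predicate used to bridge the two formulations
def pvNoAdj : List Char → Bool
  | [] => true
  | [_] => true
  | a :: b :: r => (¬ (pvDig a ∧ pvDig b)) && pvNoAdj (b :: r)

-- last char is a letter (vacuously true for [])
def pvEndsLet : List Char → Bool
  | [] => true
  | [c] => pvLet c
  | _ :: r => pvEndsLet r

lemma pvValid_iff (c : Char) : pvValid c = (pvDig c || pvLet c) := by
  simp [pvValid, pvDig, pvLet, Bool.or_comm, Bool.or_assoc, Bool.or_left_comm]

lemma pvDig_not_let {c : Char} (h : pvDig c = true) : pvLet c = false := by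
  simp [pvDig] at h
  rcases h with h|h|h|h|h <;> subst h <;> decide

lemma pvLet_not_dig {c : Char} (h : pvLet c = true) : pvDig c = false := by
  simp [pvLet] at h
  rcases h with h|h|h|h <;> subst h <;> decide

lemma pvRange_noAdj (cs : List Char) :
    (List.range (cs.length - 1)).all (fun i =>
      ¬ (pvDig (cs.getD i ' ') ∧ pvDig (cs.getD (i+1) ' '))) = pvNoAdj cs := by
  induction cs using pvNoAdj.induct with
  | case1 => simp [pvNoAdj]
  | case2 a => simp [pvNoAdj]
  | case3 a b r ih =>
    have h1 : (a :: b :: r).length - 1 = r.length + 1 := by simp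
    rw [h1, List.range_succ_eq_map, List.all_cons, List.all_map]
    simp only [List.getD_cons_succ, List.getD_cons_zero]
    rw [pvNoAdj]
    congr 1

lemma pvGoB_one (cs : List Char) :
    pvGoB 1 cs = (match cs with
      | [] => false
      | c :: _ => pvLet c && pvGoB 2 cs) := by
  cases cs with
  | nil => rfl
  | cons c rest =>
    by_cases hl : pvLet c = true
    · have hd := pvLet_not_dig hl
      simp [pvGoB, hl, hd]
    · simp at hl
      simp [pvGoB, hl]

lemma pvGoB_two (cs : List Char) :
    pvGoB 2 cs = (cs.all pvValid && pvNoAdj cs && pvEndsLet cs) := by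
  induction cs with
  | nil => rfl
  | cons c rest ih =>
    by_cases hc : pvDig c = true
    · have hcl := pvDig_not_let hc
      cases rest with
      | nil => simp [pvGoB, pvNoAdj, pvEndsLet, pvValid_iff, hc, hcl]
      | cons d r =>
        rw [show pvGoB 2 (c :: d :: r) = pvGoB 1 (d :: r) by simp [pvGoB, hc]]
        rw [pvGoB_one, ih]
        by_cases hd : pvDig d = true
        · have := pvDig_not_let hd
          simp [pvNoAdj, pvValid_iff, hc, hd, this]
        · by_cases hl : pvLet d = true
          · simp [pvNoAdj, pvEndsLet, pvValid_iff, hc, hd, hl, hcl]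
          · simp at hd hl
            simp [pvNoAdj, pvValid_iff, hc, hd, hl]
    · simp at hc
      by_cases hl : pvLet c = true
      · rw [show pvGoB 2 (c :: rest) = pvGoB 2 rest by simp [pvGoB, hc, hl]]
        rw [ih]
        cases rest with
        | nil => simp [pvNoAdj, pvEndsLet, pvValid_iff, hc, hl]
        | cons d r => simp [pvNoAdj, pvEndsLet, pvValid_iff, hc, hl]
      · simp at hl
        rw [show pvGoB 2 (c :: rest) = false by simp [pvGoB, hc, hl]]
        simp [pvValid_iff, hc, hl]

lemma pvEndsLet_cons (c : Char) (rest : List Char) :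
    pvEndsLet (c :: rest) = pvLet ((c :: rest).getLastD ' ') := by
  induction rest generalizing c with
  | nil => rfl
  | cons d r ih => rw [show pvEndsLet (c :: d :: r) = pvEndsLet (d :: r) from rfl, ih]; rfl

-- ===== VERDICT (by name: the statement is the Claim_ definition above) =====
theorem comprueba_formato_de_solucion_spec : Claim_equal_comprueba_formato_de_solucion := by
  intro solucion _
  unfold Spec_comprueba_formato_de_solucion comprueba_formato_de_solucion comprueba_formato_de_solucion_alt
  cases hcs : solucion.toList with
  | nil => rfl
  | cons c rest =>
    rw [show pvGoB 0 (c :: rest) = (pvDig c && pvGoB 1 rest) by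
      by_cases hc : pvDig c = true <;> simp [pvGoB, hc]]
    rw [pvGoB_one]
    cases rest with
    | nil =>
      by_cases hc : pvDig c = true
      · have := pvDig_not_let hc
        simp [pvValid_iff, hc, this]
      · simp at hc
        simp [pvValid_iff, hc]
    | cons d r =>
      rw [pvGoB_two, pvRange_noAdj]
      rw [show ((c :: d :: r).getLastD ' ') = ((d :: r).getLastD ' ') from rfl,
          ← pvEndsLet_cons]
      by_cases hc : pvDig c = true
      · have hvc : pvValid c = true := by rw [pvValid_iff, hc]; simp
        by_cases hd : pvDig d = true
        · have hld := pvDig_not_let hd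
          simp [pvNoAdj, hc, hd, hld, hvc]
        · by_cases hl : pvLet d = true
          · have hvd : pvValid d = true := by rw [pvValid_iff, hl]; simp
            simp at hd
            simp [pvNoAdj, hc, hd, hl, hvc, hvd]
            rw [show (!decide (∃ x ∈ r, pvValid x = false)) = r.all pvValid by
              cases h : r.all pvValid <;> simp_all [List.all_eq_true]]
            cases r.all pvValid <;> cases pvEndsLet (d :: r) <;>
              cases pvNoAdj (d :: r) <;> simp
          · have hvd : pvValid d = false := by
              simp at hd hl; rw [pvValid_iff]; simp [hd, hl]
            simp at hd hl
            simp [hc, hl, hvc, hvd]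
      · simp at hc
        simp [pvValid_iff, hc]
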